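-- pv_equiv track=rewrite | github.com/SirToby-Gore/IDE | Code/modules/code_highlighting.py | layered_brackets
-- ===== SOURCE A (Python) =====
-- def layered_brackets(code):
--     # Implement logic for layered brackets with different colors
--     # Placeholder: Add colors to open and close brackets alternatively
--     colored_code = ""
--     open_bracket = True
--     for char in code:
--         if char in ['{', '}']:
--             if open_bracket:
--                 colored_code += f"\033[91m{char}\033[0m"  # Red for open bracket
--             else:
--                 colored_code += f"\033[92m{char}\033[0m"  # Green for close bracket
--             open_bracket = not open_bracket
--         else:
--             colored_code += char
--     return colored_code
-- ===== SOURCE B (Python) =====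
-- def layered_brackets(code):
--     # Two-phase: tokenize into text segments and braces, then color by index parity.
--     RED, GREEN, RESET = "\033[91m", "\033[92m", "\033[0m"
--     segments, cur = [], ""
--     for c in code:
--         if c in "{}":
--             segments.append(cur)
--             cur = ""
--         else:
--             cur += c
--     segments.append(cur)
--     braces = [c for c in code if c in "{}"]
--     colored = [(RED if k % 2 == 0 else GREEN) + b + RESET for k, b in enumerate(braces)]
--     return segments[0] + "".join(cb + seg for cb, seg in zip(colored, segments[1:]))
-- ===== Notes on version B (the rewrite author's own statement) =====
-- stated objective: alternative
-- what changed: Replaces A's single pass that interleaves a toggled boolean with string accumulation by a two-phase tokenize-then-render design: the code is split into text segments and the brace list, each brace is colored by its index parity (enumerate), and the result is reassembled with zip/join.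
import Mathlib
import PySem

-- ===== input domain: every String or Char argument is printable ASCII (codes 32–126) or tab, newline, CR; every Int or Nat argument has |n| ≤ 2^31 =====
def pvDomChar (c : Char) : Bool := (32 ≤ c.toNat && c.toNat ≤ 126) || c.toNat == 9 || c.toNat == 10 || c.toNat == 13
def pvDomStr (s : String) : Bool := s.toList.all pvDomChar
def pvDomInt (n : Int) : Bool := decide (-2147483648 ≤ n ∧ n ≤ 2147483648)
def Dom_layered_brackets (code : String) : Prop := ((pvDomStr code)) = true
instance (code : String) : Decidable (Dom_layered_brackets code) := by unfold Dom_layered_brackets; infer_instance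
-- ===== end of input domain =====

-- B replaces A's toggled-flag single pass by a tokenize-then-render decomposition
-- (segments + braces, color chosen by enumerate-index parity, reassembled with zip/join);
-- same cost, alternative structure.


-- ANSI escape sequences shared by both ports ("\033[91m", "\033[92m", "\033[0m")
def pvRED : List Char := [Char.ofNat 27, '[', '9', '1', 'm']
def pvGREEN : List Char := [Char.ofNat 27, '[', '9', '2', 'm']
def pvRESET : List Char := [Char.ofNat 27, '[', '0', 'm']

-- ===== PORT A =====
-- A's loop body: accumulate the colored string, toggling the boolean on each brace
def pvStepA (st : List Char × Bool) (char : Char) : List Char × Bool :=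
  if char = '{' ∨ char = '}' then
    (st.1 ++ (if st.2 then pvRED else pvGREEN) ++ [char] ++ pvRESET, !st.2)
  else
    (st.1 ++ [char], st.2)

def layered_brackets (code : String) : String :=
  String.ofList (code.toList.foldl pvStepA ([], true)).1

-- ===== PORT B =====
-- B's first phase: split into finished segments and the current (unfinished) segment
def pvStepB (st : List (List Char) × List Char) (c : Char) : List (List Char) × List Char :=
  if c = '{' ∨ c = '}' then (st.1 ++ [st.2], []) else (st.1, st.2 ++ [c])

def layered_brackets_alt (code : String) : String :=
  let cs := code.toList
  let p := cs.foldl pvStepB ([], [])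
  let segments := p.1 ++ [p.2]
  let braces := cs.filter (fun c => decide (c = '{' ∨ c = '}'))
  let colored := (PySem.List.enumerate braces).map
    (fun kb => (if PySem.Int.mod kb.1 2 = 0 then pvRED else pvGREEN) ++ [kb.2] ++ pvRESET)
  String.ofList (PySem.List.pyGetD segments 0 [] ++
    PySem.Chars.join [] ((colored.zip (PySem.List.slice segments (some 1) none)).map
      (fun q => q.1 ++ q.2)))

-- ===== PRECONDITION & SPEC =====
def Spec_layered_brackets (code : String) (out : String) : Prop := out = layered_brackets_alt code
instance (code : String) (out : String) : Decidable (Spec_layered_brackets code out) := by unfold Spec_layered_brackets; infer_instance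

-- ===== CLAIM (what is proved, stated in full; the proofs are below) =====
def Claim_equal_layered_brackets : Prop := ∀ (code : String), Dom_layered_brackets code → Spec_layered_brackets code (layered_brackets code)

-- ===== LEMMAS AND PROOFS =====

-- canonical recursive description of the colored output, starting with flag b
def pvWrap (b : Bool) (c : Char) : List Char :=
  (if b then pvRED else pvGREEN) ++ [c] ++ pvRESET

def pvF : List Char → Bool → List Char
  | [], _ => []
  | c :: cs, b => if c = '{' ∨ c = '}' then pvWrap b c ++ pvF cs (!b) else c :: pvF cs b

-- the segment list (finished segments followed by the trailing segment), started from cur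
def pvT : List Char → List Char → List (List Char)
  | [], cur => [cur]
  | c :: cs, cur => if c = '{' ∨ c = '}' then cur :: pvT cs [] else pvT cs (cur ++ [c])

-- alternating colored braces, starting with color-flag b
def pvAlt : Bool → List Char → List (List Char)
  | _, [] => []
  | b, c :: cs => pvWrap b c :: pvAlt (!b) cs

theorem pvA_inv (cs : List Char) (acc : List Char) (b : Bool) :
    (cs.foldl pvStepA (acc, b)).1 = acc ++ pvF cs b := by
  induction cs generalizing acc b with
  | nil => simp [pvF]
  | cons c cs ih =>
    by_cases h : c = '{' ∨ c = '}' <;>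
      simp [pvStepA, pvF, pvWrap, h, ih, List.append_assoc]

theorem pvB_seg_inv (cs : List Char) (done : List (List Char)) (cur : List Char) :
    (cs.foldl pvStepB (done, cur)).1 ++ [(cs.foldl pvStepB (done, cur)).2]
      = done ++ pvT cs cur := by
  induction cs generalizing done cur with
  | nil => simp [pvT]
  | cons c cs ih =>
    by_cases h : c = '{' ∨ c = '}' <;> simp [pvStepB, pvT, h, ih]

theorem pvT_ne_nil (cs : List Char) (cur : List Char) : pvT cs cur ≠ [] := by
  induction cs generalizing cur with
  | nil => simp [pvT]
  | cons c cs ih =>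
    by_cases h : c = '{' ∨ c = '}' <;> simp [pvT, h, ih]

theorem pvJoin0_cons (x : List Char) (xs : List (List Char)) :
    PySem.Chars.join [] (x :: xs) = x ++ PySem.Chars.join [] xs := by
  cases xs with
  | nil => simp [PySem.Chars.join_singleton, PySem.Chars.join_nil]
  | cons y ys => simp [PySem.Chars.join_cons_cons]

theorem pvEnum_alt (braces : List Char) (k : Int) (hk : 0 ≤ k) :
    (PySem.List.enumerate braces k).map
        (fun kb => (if PySem.Int.mod kb.1 2 = 0 then pvRED else pvGREEN) ++ [kb.2] ++ pvRESET)
      = pvAlt (decide (PySem.Int.mod k 2 = 0)) braces := by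
  induction braces generalizing k with
  | nil => simp [PySem.List.enumerate, pvAlt]
  | cons c cs ih =>
    rw [show PySem.List.enumerate (c :: cs) k = (k, c) :: PySem.List.enumerate cs (k + 1) from rfl]
    rw [List.map_cons, ih (k + 1) (by omega), pvAlt]
    have h2 : PySem.Int.mod k 2 = k % 2 := PySem.Int.mod_eq_emod_of_pos (by norm_num : (0:Int) < 2)
    have h2' : PySem.Int.mod (k + 1) 2 = (k + 1) % 2 := PySem.Int.mod_eq_emod_of_pos (by norm_num : (0:Int) < 2)
    have : (decide (PySem.Int.mod (k + 1) 2 = 0)) = !(decide (PySem.Int.mod k 2 = 0)) := by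
      rw [h2, h2']; rcases Int.emod_two_eq k with h | h <;> simp [h, Int.add_mul_emod_self_left] <;> omega
    rw [this, pvWrap]
    by_cases hb : PySem.Int.mod k 2 = 0 <;> simp

theorem pvKey (cs : List Char) (cur : List Char) (b : Bool) :
    (pvT cs cur).headD [] ++
      PySem.Chars.join []
        (((pvAlt b (cs.filter (fun c => decide (c = '{' ∨ c = '}')))).zip
            (pvT cs cur).tail).map (fun q => q.1 ++ q.2))
      = cur ++ pvF cs b := by
  induction cs generalizing cur b with
  | nil => simp [pvT, pvAlt, pvF, PySem.Chars.join_nil]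
  | cons c cs ih =>
    by_cases h : c = '{' ∨ c = '}'
    · obtain ⟨y, ys, hy⟩ := List.exists_cons_of_ne_nil (pvT_ne_nil cs [])
      have ih' := ih [] (!b)
      rw [hy] at ih'
      simp only [List.headD_cons, List.tail_cons] at ih'
      simp only [pvT, pvF, List.filter_cons, h, decide_true, if_true, List.headD_cons,
        List.tail_cons, pvAlt, hy, List.zip_cons_cons, List.map_cons, pvJoin0_cons]
      simp only [List.nil_append] at ih'
      rw [List.append_assoc _ y, ih']
    · have hd : (decide (c = '{' ∨ c = '}')) = false := by simpa using h
      simp only [pvT, pvF, if_neg h, List.filter_cons, hd, Bool.false_eq_true, if_false]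
      rw [ih (cur ++ [c]) b]
      simp

theorem pvA_eq (code : String) :
    layered_brackets code = String.ofList (pvF code.toList true) := by
  unfold layered_brackets
  rw [pvA_inv code.toList [] true, List.nil_append]

theorem pvB_eq (code : String) :
    layered_brackets_alt code = String.ofList (pvF code.toList true) := by
  unfold layered_brackets_alt
  simp only
  have hseg := pvB_seg_inv code.toList [] []
  rw [List.nil_append] at hseg
  rw [hseg]
  obtain ⟨y, ys, hy⟩ := List.exists_cons_of_ne_nil (pvT_ne_nil code.toList [])
  have hget : PySem.List.pyGetD (pvT code.toList []) 0 [] = (pvT code.toList []).headD [] := by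
    rw [hy]; simp [PySem.List.pyGetD_ofNat']
  have hslice : PySem.List.slice (pvT code.toList []) (some 1) none = (pvT code.toList []).tail := by
    rw [PySem.List.slice_from _ (by norm_num : (0:Int) ≤ 1)]; simp
  rw [hget, hslice, pvEnum_alt _ 0 le_rfl]
  have h0 : (decide (PySem.Int.mod 0 2 = 0)) = true := by decide
  rw [h0]
  rw [pvKey code.toList [] true, List.nil_append]

-- ===== VERDICT (by name: the statement is the Claim_ definition above) =====
theorem layered_brackets_spec : Claim_equal_layered_brackets := by
  intro code _
  unfold Spec_layered_brackets
  rw [pvA_eq, pvB_eq]
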